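-- pv_equiv track=rewrite | github.com/tomwys/RouterOS-api | routeros_api/base_api.py | _encode_length
-- ===== SOURCE A (Python) =====
-- def _encode_length(length):
--     x = [
--         (0, 0x7F, 0x0),
--         (0x80, 0x3FFF, 0x80),
--         (0x4000, 0x1FFFFF, 0xC0),
--         (0x200000, 0xFFFFFFF, 0xE0),
--         (0x10000000, 0xFFFFFFFF, 0xF0),
--     ]
--     for bytes, (min_value, max_value, mask) in enumerate(x):
--         if min_value <= length <= max_value:
--             return length | (mask << 8 * bytes), bytes + 1
--     raise ValueError("String to long.")
-- ===== SOURCE B (Python) =====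
-- def _encode_length(length):
--     if not 0 <= length <= 0xFFFFFFFF:
--         raise ValueError("String to long.")
--     n = max(1, (length.bit_length() + 6) // 7)
--     mask = 0 if n == 1 else (0xFF << (9 - n)) & 0xFF
--     return length | (mask << (8 * (n - 1))), n
-- ===== Notes on version B (the rewrite author's own statement) =====
-- stated objective: simpler
-- what changed: B replaces A's linear scan over the five-entry (min,max,mask) range table by a closed-form computation: byte count from bit_length and the mask by direct bit arithmetic.
import Mathlib
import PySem

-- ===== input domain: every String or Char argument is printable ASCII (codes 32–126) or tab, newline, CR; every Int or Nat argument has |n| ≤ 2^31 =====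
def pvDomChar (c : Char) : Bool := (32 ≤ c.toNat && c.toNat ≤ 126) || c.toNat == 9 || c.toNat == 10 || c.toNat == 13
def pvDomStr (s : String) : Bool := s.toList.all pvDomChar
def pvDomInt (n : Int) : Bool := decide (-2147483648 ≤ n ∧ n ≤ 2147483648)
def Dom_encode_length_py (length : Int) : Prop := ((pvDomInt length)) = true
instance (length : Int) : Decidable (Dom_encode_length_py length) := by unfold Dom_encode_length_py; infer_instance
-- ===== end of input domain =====

-- B replaces A's linear scan of the range table by a closed-form bit-arithmetic computation
-- of the byte count and mask (objective: simpler).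


-- ===== PORT A =====
-- the 'for bytes, (min_value, max_value, mask) in enumerate(x)' loop; [] = the raise path
-- (ValueError "String to long."), excluded by Pre_; shift amounts are nonnegative literals so Nat shifts are exact
def encodeLoopA (length : Int) (bytes : Nat) : List (Int × Int × Int) → Int × Int
  | [] => (0, 0)  -- raise ValueError("String to long.")  (outside Pre_)
  | (min_value, max_value, mask) :: rest =>
      if min_value ≤ length ∧ length ≤ max_value then
        (Int.lor length (Int.shiftLeft mask (8 * bytes)), (bytes : Int) + 1)
      else encodeLoopA length (bytes + 1) rest

def encode_length_py (length : Int) : Int × Int :=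
  encodeLoopA length 0
    [(0, 0x7F, 0x0), (0x80, 0x3FFF, 0x80), (0x4000, 0x1FFFFF, 0xC0),
     (0x200000, 0xFFFFFFF, 0xE0), (0x10000000, 0xFFFFFFFF, 0xF0)]

-- ===== PORT B =====
-- int.bit_length(), exact for n ≥ 0 (B only calls it after the 0 ≤ length guard)
def pyBitLength (n : Int) : Int := if n = 0 then 0 else (Nat.log2 n.toNat : Int) + 1

def encode_length_py_alt (length : Int) : Int × Int :=
  if ¬ (0 ≤ length ∧ length ≤ 0xFFFFFFFF) then (0, 0)  -- raise ValueError("String to long.")  (outside Pre_)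
  else
    let n : Int := max 1 (PySem.Int.floordiv (pyBitLength length + 6) 7)
    -- shifts below are by nonnegative amounts (1 ≤ n ≤ 5), so .toNat is exact
    let mask : Int := if n = 1 then 0 else Int.land (Int.shiftLeft 0xFF (9 - n).toNat) 0xFF
    (Int.lor length (Int.shiftLeft mask (8 * (n - 1)).toNat), n)

-- ===== PRECONDITION & SPEC =====
-- Pre_ excludes exactly the inputs where A raises ValueError("String to long."): length < 0 or length > 0xFFFFFFFF
def Pre_encode_length_py (length : Int) : Prop := 0 ≤ length ∧ length ≤ 0xFFFFFFFF
instance (length : Int) : Decidable (Pre_encode_length_py length) := by unfold Pre_encode_length_py; infer_instance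
def pvWitness_encode_length_py : Int := 5

def Spec_encode_length_py (length : Int) (out : Int × Int) : Prop := out = encode_length_py_alt length
instance (length : Int) (out : Int × Int) : Decidable (Spec_encode_length_py length out) := by unfold Spec_encode_length_py; infer_instance

-- ===== CLAIM (what is proved, stated in full; the proofs are below) =====
def Claim_equal_encode_length_py : Prop := ∀ (length : Int), Dom_encode_length_py length → Pre_encode_length_py length → Spec_encode_length_py length (encode_length_py length)

-- ===== LEMMAS AND PROOFS =====

-- bit-length bounds
theorem pyBitLength_le (length : Int) (k : Nat) (h0 : 0 ≤ length) (h : length < 2 ^ k) :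
    pyBitLength length ≤ k := by
  unfold pyBitLength
  split
  · positivity
  · rename_i hne
    have hn : length.toNat ≠ 0 := by omega
    have hcast : ((2 ^ k : Nat) : Int) = (2 : Int) ^ k := by push_cast; ring
    have hlt : length.toNat < 2 ^ k := by omega
    have := (Nat.log2_lt hn).2 hlt
    omega

theorem pyBitLength_ge (length : Int) (k : Nat) (h : (2 : Int) ^ k ≤ length) :
    (k : Int) + 1 ≤ pyBitLength length := by
  have hpos : (0 : Int) < 2 ^ k := by positivity
  unfold pyBitLength
  split
  · omega
  · have hn : length.toNat ≠ 0 := by omega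
    have hcast : ((2 ^ k : Nat) : Int) = (2 : Int) ^ k := by push_cast; ring
    have hge : 2 ^ k ≤ length.toNat := by omega
    have := (Nat.le_log2 hn).2 hge
    omega

-- B's result once the byte count n is known
theorem alt_eq (length n : Int) (h0 : 0 ≤ length) (h1 : length ≤ 0xFFFFFFFF)
    (hn : max 1 (PySem.Int.floordiv (pyBitLength length + 6) 7) = n) :
    encode_length_py_alt length =
      (Int.lor length (Int.shiftLeft
          (if n = 1 then 0 else Int.land (Int.shiftLeft 0xFF (9 - n).toNat) 0xFF)
          (8 * (n - 1)).toNat), n) := by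
  unfold encode_length_py_alt
  rw [if_neg (by omega)]
  simp only [hn]

-- ===== VERDICT (by name: the statement is the Claim_ definition above) =====
theorem encode_length_py_spec : Claim_equal_encode_length_py := by
  intro length _ hpre
  obtain ⟨h0, h1⟩ := hpre
  unfold Spec_encode_length_py
  by_cases c1 : length ≤ 0x7F
  · rw [alt_eq length 1 h0 h1 (by
        have hu := pyBitLength_le length 7 h0 (by norm_num; omega)
        have hl : 0 ≤ pyBitLength length := by unfold pyBitLength; split <;> positivity
        obtain ⟨b, hb⟩ : ∃ b, pyBitLength length = b := ⟨_, rfl⟩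
        rw [hb] at hu hl ⊢
        interval_cases b <;> decide)]
    unfold encode_length_py
    simp only [encodeLoopA]
    rw [if_pos (by omega)]
    refine congrArg₂ Prod.mk (congrArg (Int.lor length) (by decide)) (by decide)
  by_cases c2 : length ≤ 0x3FFF
  · rw [alt_eq length 2 h0 h1 (by
        have hu := pyBitLength_le length 14 h0 (by norm_num; omega)
        have hl := pyBitLength_ge length 7 (by norm_num; omega)
        obtain ⟨b, hb⟩ : ∃ b, pyBitLength length = b := ⟨_, rfl⟩
        rw [hb] at hu hl ⊢
        interval_cases b <;> decide)]
    unfold encode_length_py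
    simp only [encodeLoopA]
    rw [if_neg (by omega), if_pos (by omega)]
    refine congrArg₂ Prod.mk (congrArg (Int.lor length) (by decide)) (by decide)
  by_cases c3 : length ≤ 0x1FFFFF
  · rw [alt_eq length 3 h0 h1 (by
        have hu := pyBitLength_le length 21 h0 (by norm_num; omega)
        have hl := pyBitLength_ge length 14 (by norm_num; omega)
        obtain ⟨b, hb⟩ : ∃ b, pyBitLength length = b := ⟨_, rfl⟩
        rw [hb] at hu hl ⊢
        interval_cases b <;> decide)]
    unfold encode_length_py
    simp only [encodeLoopA]
    rw [if_neg (by omega), if_neg (by omega), if_pos (by omega)]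
    refine congrArg₂ Prod.mk (congrArg (Int.lor length) (by decide)) (by decide)
  by_cases c4 : length ≤ 0xFFFFFFF
  · rw [alt_eq length 4 h0 h1 (by
        have hu := pyBitLength_le length 28 h0 (by norm_num; omega)
        have hl := pyBitLength_ge length 21 (by norm_num; omega)
        obtain ⟨b, hb⟩ : ∃ b, pyBitLength length = b := ⟨_, rfl⟩
        rw [hb] at hu hl ⊢
        interval_cases b <;> decide)]
    unfold encode_length_py
    simp only [encodeLoopA]
    rw [if_neg (by omega), if_neg (by omega), if_neg (by omega), if_pos (by omega)]
    refine congrArg₂ Prod.mk (congrArg (Int.lor length) (by decide)) (by decide)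
  rw [alt_eq length 5 h0 h1 (by
      have hu := pyBitLength_le length 32 h0 (by norm_num; omega)
      have hl := pyBitLength_ge length 28 (by norm_num; omega)
      obtain ⟨b, hb⟩ : ∃ b, pyBitLength length = b := ⟨_, rfl⟩
      rw [hb] at hu hl ⊢
      interval_cases b <;> decide)]
  unfold encode_length_py
  simp only [encodeLoopA]
  rw [if_neg (by omega), if_neg (by omega), if_neg (by omega), if_neg (by omega), if_pos (by omega)]
  refine congrArg₂ Prod.mk (congrArg (Int.lor length) (by decide)) (by decide)
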